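-- pv_equiv track=rewrite | github.com/srividyadonthineni/Group76Sudoku | sudoku.py | appear_in_box
-- ===== SOURCE A (Python) =====
-- def appear_in_box(board, column_begin, row_begin, selected_num):
--     arr = []
--     i = 0
--     while i < 3:
--         j = 0
--         while j < 3:
--             arr.append(board[row_begin + i][column_begin + j])
--             j += 1
--         i += 1
--     iterate = 0
--     i = 0
--     while i < len(arr):
--         if selected_num == arr[i]:
--             iterate += 1
--         if iterate == 2:
--             return False  # returns false if the number appears more than once in the box
--         i += 1
--     return True  # valid as the number shows up only once in the box
-- ===== SOURCE B (Python) =====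
-- def appear_in_box(board, column_begin, row_begin, selected_num):
--     count = 0
--     for i in range(3):
--         for j in range(3):
--             if selected_num == board[row_begin + i][column_begin + j]:
--                 count += 1
--     return count < 2
-- ===== Notes on version B (the rewrite author's own statement) =====
-- stated objective: simpler
-- what changed: Replaces A's two-phase structure (build a 9-element list, then rescan it with a counter and an early exit at 2) by a single fused pass over the nine box cells that counts matches and returns count < 2.
import Mathlib
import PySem

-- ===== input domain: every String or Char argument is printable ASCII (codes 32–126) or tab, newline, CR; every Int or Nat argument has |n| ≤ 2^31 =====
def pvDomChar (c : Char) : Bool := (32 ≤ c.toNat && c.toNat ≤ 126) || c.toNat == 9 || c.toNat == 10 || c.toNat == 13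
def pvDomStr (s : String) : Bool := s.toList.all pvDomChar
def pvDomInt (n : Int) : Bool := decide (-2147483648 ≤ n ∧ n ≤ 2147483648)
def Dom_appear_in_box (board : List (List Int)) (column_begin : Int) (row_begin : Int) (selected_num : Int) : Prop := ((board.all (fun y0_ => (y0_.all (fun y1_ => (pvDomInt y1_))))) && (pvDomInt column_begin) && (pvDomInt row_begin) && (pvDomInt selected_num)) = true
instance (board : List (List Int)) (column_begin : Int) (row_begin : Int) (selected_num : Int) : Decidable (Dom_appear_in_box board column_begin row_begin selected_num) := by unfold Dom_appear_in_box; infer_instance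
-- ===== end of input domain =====

-- ===== PORT A =====
-- B merges A's two passes (collect nine cells into a list, then rescan with an
-- early-exit counter) into one counting pass; equivalence is proved on Pre_
-- (all nine Python indexings in range, counting negative-index wraparound).

-- second while loop of A: scan arr with the running counter `iterate`, early return at 2
def appearScan (sn : Int) : List Int → Int → Bool
  | [], _ => true
  | x :: rest, iterate =>
    let iterate := if sn == x then iterate + 1 else iterate
    if iterate == 2 then false else appearScan sn rest iterate

def appear_in_box (board : List (List Int)) (column_begin : Int) (row_begin : Int) (selected_num : Int) : Bool :=
  let arr : List Int :=
    (PySem.List.pyRange 0 3 1).foldl (fun arr i =>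
      (PySem.List.pyRange 0 3 1).foldl (fun arr j =>
        arr ++ [PySem.List.pyGetD (PySem.List.pyGetD board (row_begin + i) []) (column_begin + j) 0]) arr) []
  appearScan selected_num arr 0

-- ===== PORT B =====
def appear_in_box_alt (board : List (List Int)) (column_begin : Int) (row_begin : Int) (selected_num : Int) : Bool :=
  let count : Int :=
    (PySem.List.pyRange 0 3 1).foldl (fun c i =>
      (PySem.List.pyRange 0 3 1).foldl (fun c j =>
        if selected_num == PySem.List.pyGetD (PySem.List.pyGetD board (row_begin + i) []) (column_begin + j) 0 then c + 1 else c) c) 0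
  decide (count < 2)

-- ===== PRECONDITION & SPEC =====
-- Pre_: all nine Python indexings board[row_begin+i][column_begin+j] (i,j in 0..2) are in
-- range (Python negative-index semantics); outside it the Python A raises IndexError.
def Pre_appear_in_box (board : List (List Int)) (column_begin : Int) (row_begin : Int) (selected_num : Int) : Prop :=
  ∀ i ∈ PySem.List.pyRange 0 3 1,
    PySem.Raise.InRange board.length (row_begin + i) ∧
    ∀ j ∈ PySem.List.pyRange 0 3 1,
      PySem.Raise.InRange (PySem.List.pyGetD board (row_begin + i) []).length (column_begin + j)
instance (board : List (List Int)) (column_begin : Int) (row_begin : Int) (selected_num : Int) : Decidable (Pre_appear_in_box board column_begin row_begin selected_num) := by unfold Pre_appear_in_box; infer_instance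

def pvWitness_appear_in_box : List (List Int) × Int × Int × Int :=
  ([[1, 2, 3], [4, 5, 6], [7, 8, 9]], 0, 0, 5)

def Spec_appear_in_box (board : List (List Int)) (column_begin : Int) (row_begin : Int) (selected_num : Int) (out : Bool) : Prop := out = appear_in_box_alt board column_begin row_begin selected_num
instance (board : List (List Int)) (column_begin : Int) (row_begin : Int) (selected_num : Int) (out : Bool) : Decidable (Spec_appear_in_box board column_begin row_begin selected_num out) := by unfold Spec_appear_in_box; infer_instance

-- ===== CLAIM (what is proved, stated in full; the proofs are below) =====
def Claim_equal_appear_in_box : Prop := ∀ (board : List (List Int)) (column_begin : Int) (row_begin : Int) (selected_num : Int), Dom_appear_in_box board column_begin row_begin selected_num → Pre_appear_in_box board column_begin row_begin selected_num → Spec_appear_in_box board column_begin row_begin selected_num (appear_in_box board column_begin row_begin selected_num)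

-- ===== LEMMAS AND PROOFS =====
-- number of occurrences of sn in a list, as an Int
def cntEq (sn : Int) : List Int → Int
  | [] => 0
  | x :: r => (if sn == x then 1 else 0) + cntEq sn r

theorem cntEq_nonneg (sn : Int) (l : List Int) : 0 ≤ cntEq sn l := by
  induction l with
  | nil => simp [cntEq]
  | cons x r ih => simp only [cntEq]; split <;> omega

-- A's early-exit scan decides `iterate + (#matches) < 2` whenever iterate ≤ 1
theorem appearScan_eq_cnt (sn : Int) (l : List Int) : ∀ it : Int, it ≤ 1 →
    appearScan sn l it = decide (it + cntEq sn l < 2) := by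
  induction l with
  | nil => intro it h; simp [appearScan, cntEq]; omega
  | cons x r ih =>
    intro it h
    simp only [appearScan, cntEq]
    by_cases hx : sn == x
    · simp only [hx, if_true]
      by_cases h2 : it + 1 = 2
      · have : (it + 1 == 2) = true := by simp [h2]
        rw [this]
        have := cntEq_nonneg sn r
        simp only [if_true]
        have : ¬ (it + (1 + cntEq sn r) < 2) := by omega
        simp [this]
      · have hne : (it + 1 == 2) = false := by simp [h2]
        rw [hne]
        simp only [if_false, Bool.false_eq_true]
        rw [ih (it + 1) (by omega)]
        congr 1
        simp only [eq_iff_iff]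
        constructor <;> intro <;> omega
    · simp only [hx, if_false, Bool.false_eq_true]
      have hne : (it == 2) = false := by simp; omega
      rw [hne]
      simp only [if_false, Bool.false_eq_true]
      rw [ih it h]
      congr 1
      simp only [eq_iff_iff]
      constructor <;> intro <;> omega

theorem cntEq_eq_countP (sn : Int) (l : List Int) :
    cntEq sn l = (l.countP (fun x => sn == x) : Int) := by
  induction l with
  | nil => simp [cntEq]
  | cons x r ih => simp only [cntEq, List.countP_cons, ih]; split <;> simp_all <;> omega

-- ===== VERDICT (by name: the statement is the Claim_ definition above) =====
theorem appear_in_box_spec : Claim_equal_appear_in_box := by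
  intro board cb rb sn _hDom _hPre
  unfold Spec_appear_in_box appear_in_box appear_in_box_alt
  simp only [PySem.List.foldl_append_singleton_eq_map, PySem.List.foldl_append_eq_flatMap,
    List.nil_append, PySem.List.foldl_if_add_one, PySem.List.foldl_add, zero_add]
  rw [appearScan_eq_cnt sn _ 0 (by omega), cntEq_eq_countP]
  congr 1
  simp only [List.countP_flatMap, eq_iff_iff]
  push_cast
  simp [Function.comp_def, List.countP_map]
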